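-- pv_equiv track=rewrite | github.com/csci595-research-lit-spring-2024/595-class-project-spring-2024-Mokshithy | src/src/responses/3/q_0927_threeEqualParts.py | find_end_of_first_part
-- ===== SOURCE A (Python) =====
-- def find_end_of_first_part(arr, ones_per_part):
--     count = 0
--     for i in range(len(arr)):
--         if arr[i] == 1:
--             count += 1
--             if count == ones_per_part:
--                 return i
--     return -1
-- ===== SOURCE B (Python) =====
-- def find_end_of_first_part(arr, ones_per_part):
--     ones = [i for i, x in enumerate(arr) if x == 1]
--     if 0 < ones_per_part <= len(ones):
--         return ones[ones_per_part - 1]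
--     return -1
-- ===== Notes on version B (the rewrite author's own statement) =====
-- stated objective: simpler
-- what changed: Replaces the counting loop with an early return by materializing the list of one-positions once and doing a guarded arithmetic lookup at index ones_per_part-1.
import Mathlib
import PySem

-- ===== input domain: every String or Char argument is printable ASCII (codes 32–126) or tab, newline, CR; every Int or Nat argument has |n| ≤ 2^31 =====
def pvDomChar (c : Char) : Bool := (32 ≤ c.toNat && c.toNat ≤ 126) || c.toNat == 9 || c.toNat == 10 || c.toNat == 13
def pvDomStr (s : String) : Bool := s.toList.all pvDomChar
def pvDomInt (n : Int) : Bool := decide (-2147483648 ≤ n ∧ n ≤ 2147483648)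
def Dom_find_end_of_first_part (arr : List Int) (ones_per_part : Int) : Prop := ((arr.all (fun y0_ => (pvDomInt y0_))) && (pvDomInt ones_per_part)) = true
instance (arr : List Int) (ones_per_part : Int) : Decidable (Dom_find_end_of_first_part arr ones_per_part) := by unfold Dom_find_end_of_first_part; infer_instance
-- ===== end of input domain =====

-- B replaces A's counting loop with an up-front table of one-positions and a guarded arithmetic lookup (objective: simpler).

-- ===== PORT A =====
-- A's for-loop over range(len(arr)) with early return, as structural recursion over the
-- remaining list carrying the running index i and the counter count.
def pvALoop : List Int → Int → Int → Int → Int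
  | [], _, _, _ => -1
  | x :: rest, k, count, i =>
    if x = 1 then
      if count + 1 = k then i else pvALoop rest k (count + 1) (i + 1)
    else pvALoop rest k count (i + 1)

def find_end_of_first_part (arr : List Int) (ones_per_part : Int) : Int :=
  pvALoop arr ones_per_part 0 0

-- ===== PORT B =====
def find_end_of_first_part_alt (arr : List Int) (ones_per_part : Int) : Int :=
  let ones := (PySem.List.enumerate arr).filterMap (fun p => if p.2 = 1 then some p.1 else none)
  if 0 < ones_per_part ∧ ones_per_part ≤ (ones.length : Int) then
    (PySem.List.pyGet? ones (ones_per_part - 1)).getD (-1)   -- guard ensures the index is in range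
  else -1

-- ===== PRECONDITION & SPEC =====
def Spec_find_end_of_first_part (arr : List Int) (ones_per_part : Int) (out : Int) : Prop := out = find_end_of_first_part_alt arr ones_per_part
instance (arr : List Int) (ones_per_part : Int) (out : Int) : Decidable (Spec_find_end_of_first_part arr ones_per_part out) := by unfold Spec_find_end_of_first_part; infer_instance

-- ===== CLAIM (what is proved, stated in full; the proofs are below) =====
def Claim_equal_find_end_of_first_part : Prop := ∀ (arr : List Int) (ones_per_part : Int), Dom_find_end_of_first_part arr ones_per_part → Spec_find_end_of_first_part arr ones_per_part (find_end_of_first_part arr ones_per_part)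

-- ===== LEMMAS AND PROOFS =====

-- the list of indices of ones in arr, counting from base i
def pvOnesFrom : List Int → Int → List Int
  | [], _ => []
  | x :: rest, i => if x = 1 then i :: pvOnesFrom rest (i + 1) else pvOnesFrom rest (i + 1)

theorem pv_filter_eq_onesFrom (arr : List Int) (s : Int) :
    (PySem.List.enumerate arr s).filterMap (fun p => if p.2 = 1 then some p.1 else none)
      = pvOnesFrom arr s := by
  induction arr generalizing s with
  | nil => simp [PySem.List.enumerate_nil, pvOnesFrom]
  | cons x rest ih =>
    simp only [PySem.List.enumerate_cons, List.filterMap_cons, pvOnesFrom]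
    split_ifs with h <;> simp [ih]

theorem pv_pyGet?_cons_pos (x : Int) (xs : List Int) (j : Int) (hj : 1 ≤ j) :
    PySem.List.pyGet? (x :: xs) j = PySem.List.pyGet? xs (j - 1) := by
  rw [PySem.List.pyGet?_of_nonneg _ (by omega : (0:Int) ≤ j),
      PySem.List.pyGet?_of_nonneg _ (by omega : (0:Int) ≤ j - 1)]
  have h : j.toNat = (j - 1).toNat + 1 := by omega
  rw [h]
  simp

theorem pv_aLoop_eq (arr : List Int) (k : Int) :
    ∀ (count i : Int),
      pvALoop arr k count i =
        (if 0 < k - count ∧ k - count ≤ ((pvOnesFrom arr i).length : Int) then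
          (PySem.List.pyGet? (pvOnesFrom arr i) (k - count - 1)).getD (-1)
        else -1) := by
  induction arr with
  | nil =>
    intro count i
    simp only [pvALoop, pvOnesFrom, List.length_nil]
    split_ifs with h
    · exfalso; push_cast at h; omega
    · rfl
  | cons x rest ih =>
    intro count i
    simp only [pvALoop, pvOnesFrom]
    by_cases hx : x = 1
    · simp only [if_pos hx]
      by_cases hk : count + 1 = k
      · have h1 : k - count = 1 := by omega
        rw [if_pos hk]
        rw [if_pos (by simp only [List.length_cons]; push_cast; omega)]
        rw [h1]
        norm_num [PySem.List.pyGet?_zero_cons]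
      · rw [if_neg hk, ih (count + 1) (i + 1)]
        by_cases hc : 0 < k - (count + 1) ∧ k - (count + 1) ≤ ((pvOnesFrom rest (i + 1)).length : Int)
        · rw [if_pos hc, if_pos (by simp only [List.length_cons] at *; push_cast at hc ⊢; omega)]
          rw [pv_pyGet?_cons_pos _ _ _ (by omega),
              show k - count - 1 - 1 = k - (count + 1) - 1 by omega]
        · rw [if_neg hc, if_neg (by simp only [List.length_cons] at *; push_cast at hc ⊢; omega)]
    · simp only [if_neg hx]
      exact ih count (i + 1)

-- ===== VERDICT (by name: the statement is the Claim_ definition above) =====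
theorem find_end_of_first_part_spec : Claim_equal_find_end_of_first_part := by
  intro arr k _
  show find_end_of_first_part arr k = find_end_of_first_part_alt arr k
  unfold find_end_of_first_part find_end_of_first_part_alt
  rw [pv_filter_eq_onesFrom, pv_aLoop_eq]
  norm_num
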